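-- pv_equiv track=rewrite | github.com/MarceloSancinetti/epa-gop-pykaldi | gop/gop_original.py | cut_align_transitions
-- ===== SOURCE A (Python) =====
-- def cut_align_transitions(align_transitions, tam):
--
--     i = 0
--     tam_parcial = 0
--     res = []
--     while i < len(align_transitions):
--        tam_actual = len(align_transitions[i])
--        if tam_parcial + tam_actual <= tam:
--             res.append(align_transitions[i])
--             tam_parcial = tam_parcial + tam_actual
--             i = i + 1
--        else:
--             return res
--
--     return res
-- ===== SOURCE B (Python) =====
-- def cut_align_transitions(align_transitions, tam):
--     # pass 1: running prefix sums of the element lengths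
--     sums = []
--     total = 0
--     for x in align_transitions:
--         total += len(x)
--         sums.append(total)
--     # pass 2: lengths are non-negative, so sums is non-decreasing and the
--     # kept prefix is exactly the sums that fit the budget
--     k = sum(1 for s in sums if s <= tam)
--     return align_transitions[:k]
-- ===== Notes on version B (the rewrite author's own statement) =====
-- stated objective: simpler
-- what changed: Replaces the greedy while-loop with early return by two plain passes: build the prefix sums of element lengths, count how many fit the budget, and return a slice of that length.
import Mathlib
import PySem

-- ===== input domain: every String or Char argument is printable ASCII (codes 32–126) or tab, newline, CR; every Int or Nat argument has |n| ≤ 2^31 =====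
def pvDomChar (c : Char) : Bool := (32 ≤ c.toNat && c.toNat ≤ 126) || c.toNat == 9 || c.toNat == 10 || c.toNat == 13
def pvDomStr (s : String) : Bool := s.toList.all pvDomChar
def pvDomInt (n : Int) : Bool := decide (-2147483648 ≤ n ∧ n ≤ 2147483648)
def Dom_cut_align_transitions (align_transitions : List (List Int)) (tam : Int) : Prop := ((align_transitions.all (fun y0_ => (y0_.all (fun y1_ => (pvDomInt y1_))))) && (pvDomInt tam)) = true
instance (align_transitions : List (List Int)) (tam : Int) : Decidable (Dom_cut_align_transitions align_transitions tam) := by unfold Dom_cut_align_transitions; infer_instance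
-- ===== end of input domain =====

-- ===== PORT A =====
-- B: two passes (prefix sums, count, slice) instead of A's greedy loop with early return; return value only.
def pvGoA (tam : Int) : List (List Int) → Int → List (List Int)
  | [], _ => []
  | x :: xs, tam_parcial =>
    if tam_parcial + (x.length : Int) ≤ tam then
      x :: pvGoA tam xs (tam_parcial + (x.length : Int))
    else
      []

def cut_align_transitions (align_transitions : List (List Int)) (tam : Int) : List (List Int) :=
  pvGoA tam align_transitions 0

-- ===== PORT B =====
def pvAccum (acc : Int) : List (List Int) → List Int
  | [] => []
  | x :: xs => (acc + (x.length : Int)) :: pvAccum (acc + (x.length : Int)) xs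

def cut_align_transitions_alt (align_transitions : List (List Int)) (tam : Int) : List (List Int) :=
  let sums := pvAccum 0 align_transitions
  let k := sums.countP (fun s => decide (s ≤ tam))
  align_transitions.take k

-- ===== PRECONDITION & SPEC =====
def Spec_cut_align_transitions (align_transitions : List (List Int)) (tam : Int) (out : List (List Int)) : Prop := out = cut_align_transitions_alt align_transitions tam
instance (align_transitions : List (List Int)) (tam : Int) (out : List (List Int)) : Decidable (Spec_cut_align_transitions align_transitions tam out) := by unfold Spec_cut_align_transitions; infer_instance

-- ===== CLAIM (what is proved, stated in full; the proofs are below) =====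
def Claim_equal_cut_align_transitions : Prop := ∀ (align_transitions : List (List Int)) (tam : Int), Dom_cut_align_transitions align_transitions tam → Spec_cut_align_transitions align_transitions tam (cut_align_transitions align_transitions tam)

-- ===== LEMMAS AND PROOFS =====

-- ===== VERDICT (by name: the statement is the Claim_ definition above) =====
theorem pvAccum_ge {acc : Int} {xs : List (List Int)} {s : Int}
    (h : s ∈ pvAccum acc xs) : acc ≤ s := by
  induction xs generalizing acc with
  | nil => simp [pvAccum] at h
  | cons x xs ih =>
    simp [pvAccum] at h
    rcases h with h | h
    · omega
    · have := ih h
      have : (0:Int) ≤ (x.length : Int) := Int.natCast_nonneg _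
      omega

theorem pvGo_eq (tam : Int) (xs : List (List Int)) (acc : Int) :
    pvGoA tam xs acc = xs.take ((pvAccum acc xs).countP (fun s => decide (s ≤ tam))) := by
  induction xs generalizing acc with
  | nil => simp [pvGoA, pvAccum]
  | cons x xs ih =>
    simp only [pvGoA, pvAccum]
    by_cases h : acc + (x.length : Int) ≤ tam
    · simp [h, ih]
    · have hcnt : (pvAccum (acc + (x.length : Int)) xs).countP (fun s => decide (s ≤ tam)) = 0 := by
        rw [List.countP_eq_zero]
        intro s hs
        have := pvAccum_ge hs
        simp
        omega
      simp [h, hcnt]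

theorem cut_align_transitions_spec : Claim_equal_cut_align_transitions := by
  intro ats tam _
  unfold Spec_cut_align_transitions cut_align_transitions cut_align_transitions_alt
  exact pvGo_eq tam ats 0
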